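-- pv_equiv track=rewrite | github.com/asrubel/Hyperskill_Python_Tic-Tac-Toe | Tic-Tac-Toe/What's up on a field?/tictactoe_3_stage.py | cells2mat
-- ===== SOURCE A (Python) =====
-- def cells2mat(cells, rotate=False):
--     mat = []
--     for i in range(3):
--         mat.append([])
--         for j in range(3):
--             index = (j * 3 + i) if rotate else (i * 3 + j)
--             mat[i].append(cells[index])
--     return mat
-- ===== SOURCE B (Python) =====
-- def cells2mat(cells, rotate=False):
--     mat = [[cells[i * 3 + j] for j in range(3)] for i in range(3)]
--     if rotate:
--         mat = [list(row) for row in zip(*mat)]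
--     return mat
-- ===== Notes on version B (the rewrite author's own statement) =====
-- stated objective: simpler
-- what changed: B builds the row-major 3x3 matrix unconditionally and, when rotate is set, transposes it in a separate zip pass, replacing A's per-element conditional index arithmetic.
import Mathlib
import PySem

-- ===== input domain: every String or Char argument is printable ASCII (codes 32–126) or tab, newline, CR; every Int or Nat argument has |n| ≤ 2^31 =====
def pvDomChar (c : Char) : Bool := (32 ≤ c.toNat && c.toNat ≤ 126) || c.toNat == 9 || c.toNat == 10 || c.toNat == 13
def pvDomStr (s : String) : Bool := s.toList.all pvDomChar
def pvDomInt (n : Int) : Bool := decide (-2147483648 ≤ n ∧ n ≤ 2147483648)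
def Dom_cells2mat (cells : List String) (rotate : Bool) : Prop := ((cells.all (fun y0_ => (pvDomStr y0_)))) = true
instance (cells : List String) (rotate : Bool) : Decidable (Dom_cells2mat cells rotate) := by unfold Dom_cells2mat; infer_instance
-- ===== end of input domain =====

-- ===== PORT A =====
-- header: B builds the row-major matrix, then transposes in a separate pass when rotate is set (objective: simpler).
-- Pre_ excludes inputs with fewer than 9 cells, on which Python A raises IndexError.
def cells2mat (cells : List String) (rotate : Bool) : List (List String) :=
  (PySem.List.pyRange 0 3 1).foldl (fun mat i =>
    mat ++ [(PySem.List.pyRange 0 3 1).foldl (fun row j =>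
      let index := if rotate then j * 3 + i else i * 3 + j
      row ++ [(PySem.List.pyGet? cells index).getD ""]) []]) []

-- ===== PORT B =====
-- zip(*mat) for the 3x3 matrix, ported by hand (exact for a 3x3 matrix)
def pvTranspose3 (mat : List (List String)) : List (List String) :=
  ((mat.getD 0 []).zip ((mat.getD 1 []).zip (mat.getD 2 []))).map
    (fun p => [p.1, p.2.1, p.2.2])

def cells2mat_alt (cells : List String) (rotate : Bool) : List (List String) :=
  let mat := (PySem.List.pyRange 0 3 1).map (fun i =>
    (PySem.List.pyRange 0 3 1).map (fun j =>
      (PySem.List.pyGet? cells (i * 3 + j)).getD ""))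
  if rotate then pvTranspose3 mat else mat

-- ===== PRECONDITION & SPEC =====
-- Pre_: A indexes cells[0..8], so it raises IndexError iff fewer than 9 cells.
def Pre_cells2mat (cells : List String) (rotate : Bool) : Prop := 9 ≤ cells.length
instance (cells : List String) (rotate : Bool) : Decidable (Pre_cells2mat cells rotate) := by unfold Pre_cells2mat; infer_instance
def pvWitness_cells2mat : List String × Bool := (["X","O","X","O"," ","O","X"," ","X"], true)

def Spec_cells2mat (cells : List String) (rotate : Bool) (out : List (List String)) : Prop := out = cells2mat_alt cells rotate
instance (cells : List String) (rotate : Bool) (out : List (List String)) : Decidable (Spec_cells2mat cells rotate out) := by unfold Spec_cells2mat; infer_instance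

-- ===== CLAIM (what is proved, stated in full; the proofs are below) =====
def Claim_equal_cells2mat : Prop := ∀ (cells : List String) (rotate : Bool), Dom_cells2mat cells rotate → Pre_cells2mat cells rotate → Spec_cells2mat cells rotate (cells2mat cells rotate)

-- ===== LEMMAS AND PROOFS =====

-- ===== VERDICT (by name: the statement is the Claim_ definition above) =====
theorem cells2mat_spec : Claim_equal_cells2mat := by
  intro cells rotate _ _
  unfold Spec_cells2mat cells2mat cells2mat_alt pvTranspose3
  cases rotate <;> simp [PySem.List.pyRange, show (3:Int).toNat = 3 from rfl, List.range_succ]
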